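-- pv_equiv track=rewrite | github.com/PStamelias/BigDataProject | kvServer.py | SearchSpecificValueOnkey
-- ===== SOURCE A (Python) =====
-- def getListOfSubKeys(value):
-- 	List_ofValues=[]
-- 	value=value[1:-1]
-- 	e=""
-- 	counter1=0
-- 	cut=True
-- 	for i in range(0,len(value)):
-- 		if i ==len(value)-1:
-- 			e+=value[i]
-- 			List_ofValues.append(e)
-- 			break
-- 		if value[i]=="{":
-- 			counter1+=1
-- 		if value[i]=='}':
-- 			counter1-=1
-- 		if  value[i]==';' and counter1==0:
-- 			List_ofValues.append(e)
-- 			e=""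
-- 			cut=False
-- 			continue
-- 		e+=value[i]
-- 	return List_ofValues
--
-- def getValuesOfrow(row):
-- 	write=False
-- 	value=""
-- 	for i in range(0,len(row)):
-- 		if row[i]=='{':
-- 			write=True
-- 			value+=row[i]
-- 			continue
-- 		if write==True:
-- 			value+=row[i]
-- 	return value
--
-- def GetValueofKey(Line):
-- 	position=Line.find(':')
-- 	position+=1
-- 	str=""
-- 	for i in range(position,len(Line)):
-- 		str+=Line[i]
-- 	if "{" in str:
-- 		return "NOT-FOUND"
-- 	return str
--
-- def SearchSpecificValueOnkey(row,listof_keys,counter,lenList):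
-- 	List_ofValues=getListOfSubKeys(row)
-- 	for i in range(0,len(List_ofValues)):
-- 		conditionone=List_ofValues[i].find(listof_keys[counter])
-- 		if conditionone==-1:
-- 			continue
-- 		current_string=List_ofValues[i][:conditionone+len(listof_keys[counter])+1]
-- 		if "{" in current_string:
-- 			continue
-- 		if counter==lenList-1:
-- 			return GetValueofKey(List_ofValues[i])
-- 		newList_ofValues=getValuesOfrow(List_ofValues[i])
-- 		return SearchSpecificValueOnkey(newList_ofValues,listof_keys,counter+1,lenList)
-- 	return "NOT-FOUND"
-- ===== SOURCE B (Python) =====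
-- def getListOfSubKeys(value):
-- 	List_ofValues=[]
-- 	value=value[1:-1]
-- 	e=""
-- 	counter1=0
-- 	cut=True
-- 	for i in range(0,len(value)):
-- 		if i ==len(value)-1:
-- 			e+=value[i]
-- 			List_ofValues.append(e)
-- 			break
-- 		if value[i]=="{":
-- 			counter1+=1
-- 		if value[i]=='}':
-- 			counter1-=1
-- 		if  value[i]==';' and counter1==0:
-- 			List_ofValues.append(e)
-- 			e=""
-- 			cut=False
-- 			continue
-- 		e+=value[i]
-- 	return List_ofValues
--
-- def getValuesOfrow(row):
-- 	write=False
-- 	value=""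
-- 	for i in range(0,len(row)):
-- 		if row[i]=='{':
-- 			write=True
-- 			value+=row[i]
-- 			continue
-- 		if write==True:
-- 			value+=row[i]
-- 	return value
--
-- def GetValueofKey(Line):
-- 	position=Line.find(':')
-- 	position+=1
-- 	str=""
-- 	for i in range(position,len(Line)):
-- 		str+=Line[i]
-- 	if "{" in str:
-- 		return "NOT-FOUND"
-- 	return str
--
-- def SearchSpecificValueOnkey(row, listof_keys, counter, lenList):
--     # iterative descent: the current row and key index live in loop variables,
--     # and each level picks its entry with a single first-match lookup
--     while True:
--         entries = getListOfSubKeys(row)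
--         if not entries:
--             return "NOT-FOUND"
--         key = listof_keys[counter]
--         entry = next((e for e in entries
--                       if e.find(key) != -1
--                       and "{" not in e[:e.find(key) + len(key) + 1]), None)
--         if entry is None:
--             return "NOT-FOUND"
--         if counter == lenList - 1:
--             return GetValueofKey(entry)
--         row = getValuesOfrow(entry)
--         counter += 1
-- ===== Notes on version B (the rewrite author's own statement) =====
-- stated objective: simpler
-- what changed: Replaced A's recursive descent with an iterative while-loop that updates the current row and key index in loop variables, and replaced the inner for/continue/early-return scan with a single next(generator) first-match lookup; helper functions unchanged; B raises IndexError exactly where A does.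
-- outside the precondition, e.g. on SearchSpecificValueOnkey('{a:{b:1}}', ['a', 'b'], 1, 3): A returns 'NOT-FOUND', B returns 'NOT-FOUND'
import Mathlib
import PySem

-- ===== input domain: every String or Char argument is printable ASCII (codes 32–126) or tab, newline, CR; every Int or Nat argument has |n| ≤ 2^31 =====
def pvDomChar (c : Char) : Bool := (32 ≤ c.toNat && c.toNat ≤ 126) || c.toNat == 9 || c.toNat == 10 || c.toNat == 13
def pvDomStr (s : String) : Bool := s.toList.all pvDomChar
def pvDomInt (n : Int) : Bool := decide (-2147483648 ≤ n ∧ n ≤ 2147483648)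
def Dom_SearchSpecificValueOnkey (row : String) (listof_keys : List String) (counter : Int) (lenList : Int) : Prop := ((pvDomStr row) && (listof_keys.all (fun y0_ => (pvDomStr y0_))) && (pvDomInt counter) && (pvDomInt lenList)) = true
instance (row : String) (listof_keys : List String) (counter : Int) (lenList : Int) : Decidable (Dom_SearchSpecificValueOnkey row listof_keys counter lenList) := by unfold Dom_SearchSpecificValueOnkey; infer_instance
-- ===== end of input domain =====

-- B replaces A's recursive descent and inner for/continue scan by an iterative loop with a
-- first-match lookup per level; objective: simpler (same cost).

-- ===== PORT A =====
-- shared helpers (identical in both Pythons), over List Char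

-- A's indexed for-loop over value, written structurally on the unprocessed suffix:
-- "i = len(value)-1" is "exactly one character left", value[i] is its head.
def getListOfSubKeysLoop : List Char → List Char → Int → List (List Char) → List (List Char)
  | [], _, _, acc => acc
  | [c], e, _, acc => acc ++ [e ++ [c]]
  | c :: c' :: rest, e, c1, acc =>
    let c1 := c1 + (if c = '{' then 1 else 0)
    let c1 := c1 + (if c = '}' then -1 else 0)
    if c = ';' ∧ c1 = 0 then getListOfSubKeysLoop (c' :: rest) [] c1 (acc ++ [e])
    else getListOfSubKeysLoop (c' :: rest) (e ++ [c]) c1 acc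

def getListOfSubKeys (value : List Char) : List (List Char) :=
  getListOfSubKeysLoop (PySem.List.slice value (some 1) (some (-1))) [] 0 []

def getValuesOfrow (row : List Char) : List Char :=
  (row.foldl (fun (s : Bool × List Char) c =>
      if c = '{' then (true, s.2 ++ [c])
      else if s.1 = true then (s.1, s.2 ++ [c])
      else s) (false, [])).2

def getValueofKey (line : List Char) : List Char :=
  let position := PySem.Chars.find line [':'] + 1
  let str := (PySem.List.pyRange position (line.length : Int) 1).foldl
      (fun acc i => acc ++ ((PySem.List.pyGet? line i).map (fun c => [c])).getD []) []
  if PySem.Chars.isIn ['{'] str then "NOT-FOUND".toList else str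

-- A's inner for-loop over List_ofValues; the recursive call to SearchSpecificValueOnkey is the
-- callback `recur` (supplied below with one unit of fuel consumed), keeping the recursion structural.
def goA (recur : List Char → Int → String) (counter lenList : Int) (key : List Char) :
    List (List Char) → String
  | [] => "NOT-FOUND"
  | entry :: rest =>
    let conditionone := PySem.Chars.find entry key
    if conditionone = -1 then goA recur counter lenList key rest
    else
      let current := PySem.List.slice entry none (some (conditionone + (key.length : Int) + 1))
      if PySem.Chars.isIn ['{'] current then goA recur counter lenList key rest
      else if counter = lenList - 1 then String.ofList (getValueofKey entry)
      else recur (getValuesOfrow entry) (counter + 1)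

-- A's main function: the recursive descent.  fuel only makes the recursion total;
-- ample for every input on which the Python returns.
def searchA (fuel : Nat) (row : List Char) (keys : List String) (counter lenList : Int) : String :=
  match fuel with
  | 0 => "NOT-FOUND"  -- unreachable where the Python returns
  | Nat.succ f =>
    match PySem.List.pyGet? keys counter with
    | none => "NOT-FOUND"  -- Python raises IndexError on the first scanned entry (outside Pre_); with no entries the scan is empty and both yield NOT-FOUND
    | some key =>
      goA (fun r c => searchA f r keys c lenList) counter lenList key.toList (getListOfSubKeys row)

def SearchSpecificValueOnkey (row : String) (listof_keys : List String) (counter : Int) (lenList : Int) : String :=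
  searchA (2 * listof_keys.length + 2) row.toList listof_keys counter lenList

-- ===== PORT B =====

def qualifiesB (key : List Char) (entry : List Char) : Bool :=
  PySem.Chars.find entry key != -1 &&
    !(PySem.Chars.isIn ['{']
      (PySem.List.slice entry none (some (PySem.Chars.find entry key + (key.length : Int) + 1))))

-- Source B's `while True` loop; fuel only makes it total, ample where the Python returns.
def searchB (fuel : Nat) (row : List Char) (keys : List String) (counter lenList : Int) : String :=
  match fuel with
  | 0 => "NOT-FOUND"  -- unreachable where the Python returns
  | Nat.succ f =>
    match getListOfSubKeys row with
    | [] => "NOT-FOUND"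
    | e0 :: es =>
      match PySem.List.pyGet? keys counter with
      | none => "NOT-FOUND"  -- Python raises IndexError here (outside Pre_)
      | some key =>
        match (e0 :: es).find? (qualifiesB key.toList) with
        | none => "NOT-FOUND"
        | some entry =>
          if counter = lenList - 1 then String.ofList (getValueofKey entry)
          else searchB f (getValuesOfrow entry) keys (counter + 1) lenList

def SearchSpecificValueOnkey_alt (row : String) (listof_keys : List String) (counter : Int) (lenList : Int) : String :=
  searchB (2 * listof_keys.length + 2) row.toList listof_keys counter lenList

-- ===== PRECONDITION & SPEC =====
-- A raises IndexError when its descent indexes listof_keys out of range; whether that happens is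
-- data-dependent, so Pre_ under-approximates A's raise-free domain by closed-form shapes: rows with
-- no sub-entries (length ≤ 2), the natural call shape 0 ≤ counter < lenList ≤ len(listof_keys), and
-- '{'-free rows with a valid first index (their descent ends within one level).  B raises exactly
-- where A raises and matches A wherever A returns, so nothing excluded is a value B declines to match.
def Pre_SearchSpecificValueOnkey (row : String) (listof_keys : List String) (counter : Int) (lenList : Int) : Prop :=
  (row.toList.length ≤ 2)
  ∨ (0 ≤ counter ∧ counter < lenList ∧ lenList ≤ (listof_keys.length : Int))
  ∨ (-(listof_keys.length : Int) ≤ counter ∧ counter < (listof_keys.length : Int) ∧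
     PySem.Str.isIn "{" row = false)
instance (row : String) (listof_keys : List String) (counter : Int) (lenList : Int) : Decidable (Pre_SearchSpecificValueOnkey row listof_keys counter lenList) := by unfold Pre_SearchSpecificValueOnkey; infer_instance

def pvWitness_SearchSpecificValueOnkey : String × List String × Int × Int := ("{a:1;b:{c:2;d:3}}", ["b", "c"], 0, 2)

def Spec_SearchSpecificValueOnkey (row : String) (listof_keys : List String) (counter : Int) (lenList : Int) (out : String) : Prop := out = SearchSpecificValueOnkey_alt row listof_keys counter lenList
instance (row : String) (listof_keys : List String) (counter : Int) (lenList : Int) (out : String) : Decidable (Spec_SearchSpecificValueOnkey row listof_keys counter lenList out) := by unfold Spec_SearchSpecificValueOnkey; infer_instance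

-- ===== CLAIM (what is proved, stated in full; the proofs are below) =====
def Claim_equal_SearchSpecificValueOnkey : Prop := ∀ (row : String) (listof_keys : List String) (counter : Int) (lenList : Int), Dom_SearchSpecificValueOnkey row listof_keys counter lenList → Pre_SearchSpecificValueOnkey row listof_keys counter lenList → Spec_SearchSpecificValueOnkey row listof_keys counter lenList (SearchSpecificValueOnkey row listof_keys counter lenList)

-- ===== LEMMAS AND PROOFS =====

-- A's inner for-loop is a first-match scan: it acts at the first entry satisfying qualifiesB.
theorem goA_eq_find? (recur : List Char → Int → String) (counter lenList : Int) (key : List Char)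
    (es : List (List Char)) :
    goA recur counter lenList key es =
      match es.find? (qualifiesB key) with
      | none => "NOT-FOUND"
      | some entry =>
        if counter = lenList - 1 then String.ofList (getValueofKey entry)
        else recur (getValuesOfrow entry) (counter + 1) := by
  induction es with
  | nil => simp [goA]
  | cons entry rest ih =>
    rw [goA]
    by_cases h1 : PySem.Chars.find entry key = -1
    · simp [h1, qualifiesB, List.find?, ih]
    · by_cases h2 : PySem.Chars.isIn ['{']
        (PySem.List.slice entry none (some (PySem.Chars.find entry key + (key.length : Int) + 1))) = true
      · simp [h1, h2, qualifiesB, List.find?, ih]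
      · have hb : (PySem.Chars.find entry key != -1) = true := by simp [bne, h1]
        simp [qualifiesB, List.find?, h1, h2, hb]

-- the two main loops agree level by level (the ports are in fact equal on every input)
theorem searchA_eq_searchB (fuel : Nat) (row : List Char) (keys : List String)
    (counter lenList : Int) :
    searchA fuel row keys counter lenList = searchB fuel row keys counter lenList := by
  induction fuel generalizing row counter with
  | zero => rw [searchA, searchB]
  | succ f ih =>
    rw [searchA, searchB]
    cases hes : getListOfSubKeys row with
    | nil =>
      cases PySem.List.pyGet? keys counter with
      | none => rfl
      | some key => dsimp only; rw [goA_eq_find?]; simp [List.find?]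
    | cons e0 es =>
      cases PySem.List.pyGet? keys counter with
      | none => rfl
      | some key =>
        dsimp only
        rw [goA_eq_find?]
        cases (e0 :: es).find? (qualifiesB key.toList) with
        | none => rfl
        | some entry =>
          by_cases hlast : counter = lenList - 1
          · simp [hlast]
          · simp only [hlast, if_false]
            exact ih (getValuesOfrow entry) (counter + 1)

-- ===== VERDICT (by name: the statement is the Claim_ definition above) =====
theorem SearchSpecificValueOnkey_spec : Claim_equal_SearchSpecificValueOnkey := by
  intro row keys counter lenList _hDom _hPre
  unfold Spec_SearchSpecificValueOnkey SearchSpecificValueOnkey SearchSpecificValueOnkey_alt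
  exact searchA_eq_searchB _ _ _ _ _
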